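-- pv_equiv track=rewrite | github.com/Arsen1302/Code-copy-detector | TestData/solutions/problem_546_5.py | solution_546_5
-- ===== SOURCE A (Python) =====
-- def solution_546_5(A: str, B: str) -> bool:
--
--     if len(A)!=len(B) or set(A)!=set(B):
--         return False
--
--     if A==B: #must have atleast 1 rep char
--         return len(A)!=len(set(A))
--
--
--     #A and B now same length, lets swap
--     firstMissMatch=0
--     flagOK=0
--
--     for a,b in zip(A,B):
--         if a==b: continue  #if letters are qual just continue
--         if not firstMissMatch:  #if this is the firstMistMatch, flip firstMissMatch flap to 1 and store the chars
--             swapA,swapB=a,b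
--             firstMissMatch=1
--         elif flagOK==0: #i.e: this is the 2nd mismatch, need to check if the chars to be swapped are equal to the previous mismatch
--             flagOK=1 if a==swapB and b==swapA else 2
--         else:
--             return False #meaning more than 1 mismatch appeared
--     return flagOK==1 #if flag=0 (no swap) or flag=2 (swap but letters dont match i.e: A=abcaa and B=abcbb) return False
-- ===== SOURCE B (Python) =====
-- def _trim(la, lb):
--     # drop the longest common prefix of the two equal-length lists
--     i = 0
--     while i < len(la) and la[i] == lb[i]:
--         i += 1
--     return la[i:], lb[i:]
--
-- def solution_546_5(A: str, B: str) -> bool: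
--     if len(A) != len(B):
--         return False
--     if A == B:
--         return len(set(A)) < len(A)
--     la, lb = _trim(list(A), list(B))          # trim the common prefix
--     la, lb = _trim(la[::-1], lb[::-1])        # trim the common suffix
--     la, lb = la[::-1], lb[::-1]               # core: first..last mismatch
--     return (len(la) >= 2 and la[0] == lb[-1] and la[-1] == lb[0]
--             and la[1:-1] == lb[1:-1])
-- ===== Notes on version B (the rewrite author's own statement) =====
-- stated objective: alternative
-- what changed: B drops A's redundant set(A)==set(B) guard and replaces the stateful single-pass mismatch machine (firstMissMatch/flagOK/swap chars) by trimming the longest common prefix and common suffix of the two strings and then checking that the remaining core has length >= 2, its end characters are crossed, and its interior is identical.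
import Mathlib
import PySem

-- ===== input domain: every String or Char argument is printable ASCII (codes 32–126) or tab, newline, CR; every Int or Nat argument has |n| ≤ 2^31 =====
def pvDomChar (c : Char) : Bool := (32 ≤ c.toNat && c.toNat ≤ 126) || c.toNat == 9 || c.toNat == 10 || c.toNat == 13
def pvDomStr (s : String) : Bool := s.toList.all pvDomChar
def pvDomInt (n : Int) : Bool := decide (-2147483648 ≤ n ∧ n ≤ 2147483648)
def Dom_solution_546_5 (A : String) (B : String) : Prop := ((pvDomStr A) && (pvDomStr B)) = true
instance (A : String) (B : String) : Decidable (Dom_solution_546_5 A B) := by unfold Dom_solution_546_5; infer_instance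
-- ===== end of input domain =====

-- B drops A's redundant set-equality guard and, instead of threading firstMissMatch/flagOK
-- state through one scan, trims the common prefix and suffix and checks the remaining core
-- (objective: alternative decomposition, same cost).

-- ===== PORT A =====
-- the for-loop over zip(A,B) with state (firstMissMatch, flagOK, swapA, swapB); 'return False' = the last arm
def pvLoopA : List (Char × Char) → Int → Int → Char → Char → Bool
  | [], _, flagOK, _, _ => flagOK == 1
  | (a, b) :: rest, fm, flagOK, sA, sB =>
    if a == b then pvLoopA rest fm flagOK sA sB
    else if fm == 0 then pvLoopA rest 1 flagOK a b
    else if flagOK == 0 then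
      pvLoopA rest fm (if a == sB && b == sA then 1 else 2) sA sB
    else false

def solution_546_5 (A : String) (B : String) : Bool :=
  if A.toList.length != B.toList.length
      || !(PySem.Set.equal (PySem.Set.ofList A.toList) (PySem.Set.ofList B.toList)) then false
  else if A == B then A.toList.length != (PySem.Set.ofList A.toList).length
  else pvLoopA (A.toList.zip B.toList) 0 0 ' ' ' '  -- swapA/swapB start unassigned in Python; unread until set

-- ===== PORT B =====
-- _trim: the index loop counts the common prefix and returns the suffixes from the first
-- mismatch on; ported as the obvious structural recursion over the two lists.
def pvTrim : List Char → List Char → List Char × List Char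
  | a :: la, b :: lb => if a == b then pvTrim la lb else (a :: la, b :: lb)
  | la, lb => (la, lb)

def solution_546_5_alt (A : String) (B : String) : Bool :=
  if A.toList.length != B.toList.length then false
  else if A == B then decide ((PySem.Set.ofList A.toList).length < A.toList.length)
  else
    let p1 := pvTrim A.toList B.toList            -- trim the common prefix
    let p2 := pvTrim p1.1.reverse p1.2.reverse    -- trim the common suffix
    let la := p2.1.reverse                        -- core: first..last mismatch
    let lb := p2.2.reverse
    -- len(la) >= 2 and la[0] == lb[-1] and la[-1] == lb[0] and la[1:-1] == lb[1:-1]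
    -- (Python's l[1:-1] equals (l.drop 1).dropLast for every list)
    decide (2 ≤ la.length) && (la.head? == lb.getLast?) && (la.getLast? == lb.head?)
      && decide ((la.drop 1).dropLast = (lb.drop 1).dropLast)

-- ===== PRECONDITION & SPEC =====
def Spec_solution_546_5 (A : String) (B : String) (out : Bool) : Prop := out = solution_546_5_alt A B
instance (A : String) (B : String) (out : Bool) : Decidable (Spec_solution_546_5 A B out) := by unfold Spec_solution_546_5; infer_instance

-- ===== CLAIM (what is proved, stated in full; the proofs are below) =====
def Claim_equal_solution_546_5 : Prop := ∀ (A : String) (B : String), Dom_solution_546_5 A B → Spec_solution_546_5 A B (solution_546_5 A B)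

-- ===== LEMMAS AND PROOFS =====

def pvF (l : List (Char × Char)) : List (Char × Char) := l.filter (fun p => p.1 != p.2)

lemma pvF_cons (a b : Char) (l : List (Char × Char)) :
    pvF ((a, b) :: l) = if a = b then pvF l else (a, b) :: pvF l := by
  by_cases h : a = b <;> simp [pvF, h]

lemma pvLoopA_flag2 (l : List (Char × Char)) (sA sB : Char) :
    pvLoopA l 1 2 sA sB = false := by
  induction l with
  | nil => simp [pvLoopA]
  | cons p rest ih =>
    obtain ⟨a, b⟩ := p
    by_cases h : a = b <;> simp [pvLoopA, h, ih]

lemma pvLoopA_flag1 (l : List (Char × Char)) (sA sB : Char) :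
    pvLoopA l 1 1 sA sB = decide (pvF l = []) := by
  induction l with
  | nil => simp [pvLoopA, pvF]
  | cons p rest ih =>
    obtain ⟨a, b⟩ := p
    by_cases h : a = b <;> simp [pvLoopA, h, ih, pvF_cons]

lemma pvLoopA_one (l : List (Char × Char)) (sA sB : Char) :
    pvLoopA l 1 0 sA sB =
      (match pvF l with
       | [(a, b)] => a == sB && b == sA
       | _ => false) := by
  induction l generalizing sA sB with
  | nil => simp [pvLoopA, pvF]
  | cons p rest ih =>
    obtain ⟨a, b⟩ := p
    by_cases h : a = b
    · simp [pvLoopA, h, ih, pvF_cons]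
    · simp only [pvLoopA, beq_iff_eq, h, if_false, pvF_cons,
        show ((1 : Int) == 0) = false from rfl, show ((0 : Int) == 0) = true from rfl, if_true]
      by_cases hc : (a == sB && b == sA) = true
      · rw [if_pos hc, pvLoopA_flag1]
        cases hF : pvF rest with
        | nil => simp [hc]
        | cons q t => simp
      · rw [if_neg hc, pvLoopA_flag2]
        cases hF : pvF rest with
        | nil => simp only [Bool.not_eq_true] at hc; simp [hc]
        | cons q t => simp

lemma pvLoopA_start (l : List (Char × Char)) (c d : Char) :
    pvLoopA l 0 0 c d =
      (match pvF l with
       | [(a1, b1), (a2, b2)] => a2 == b1 && b2 == a1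
       | _ => false) := by
  induction l generalizing c d with
  | nil => simp [pvLoopA, pvF]
  | cons p rest ih =>
    obtain ⟨a, b⟩ := p
    by_cases h : a = b
    · simp [pvLoopA, h, ih, pvF_cons]
    · simp only [pvLoopA, beq_iff_eq, h, if_false, pvF_cons,
        show ((0 : Int) == 0) = true from rfl, if_true]
      rw [pvLoopA_one]
      cases hF : pvF rest with
      | nil => simp
      | cons q t =>
        obtain ⟨a2, b2⟩ := q
        cases t with
        | nil => simp
        | cons r u => simp

-- multiset bookkeeping: equal-length lists differ exactly by the mismatched pairs
lemma pv_multiset (la lb : List Char) (h : la.length = lb.length) :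
    (↑la : Multiset Char) + ↑((pvF (la.zip lb)).map Prod.snd)
      = (↑lb : Multiset Char) + ↑((pvF (la.zip lb)).map Prod.fst) := by
  induction la generalizing lb with
  | nil => cases lb with
    | nil => rfl
    | cons b lb' => simp at h
  | cons a la' ih =>
    cases lb with
    | nil => simp at h
    | cons b lb' =>
      simp only [List.length_cons, Nat.add_right_cancel_iff] at h
      have ihe := ih lb' h
      by_cases hab : a = b
      · subst hab
        simp only [List.zip_cons_cons, pvF_cons, if_true]
        simp only [← Multiset.cons_coe, Multiset.cons_add]
        rw [ihe]
      · simp only [List.zip_cons_cons, pvF_cons, if_neg hab, List.map_cons]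
        simp only [← Multiset.cons_coe, Multiset.cons_add, Multiset.add_cons]
        rw [ihe, Multiset.cons_swap]

lemma pv_sets_equal (la lb : List Char) (h : la.length = lb.length)
    (a1 b1 a2 b2 : Char) (hF : pvF (la.zip lb) = [(a1, b1), (a2, b2)])
    (h1 : a1 = b2) (h2 : b1 = a2) :
    PySem.Set.equal (PySem.Set.ofList la) (PySem.Set.ofList lb) = true := by
  have hm := pv_multiset la lb h
  rw [hF] at hm
  simp only [List.map_cons, List.map_nil] at hm
  have hsw : ((↑[b1, b2] : Multiset Char)) = (↑[a1, a2] : Multiset Char) := by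
    subst h1; subst h2
    simp only [← Multiset.cons_coe, Multiset.cons_swap]
  have h' : (↑la : Multiset Char) + ↑[a1, a2] = ↑lb + ↑[a1, a2] := by
    calc (↑la : Multiset Char) + ↑[a1, a2] = ↑la + ↑[b1, b2] := by rw [hsw]
      _ = ↑lb + ↑[a1, a2] := hm
  have hmm : (↑la : Multiset Char) = ↑lb := add_right_cancel h'
  have hperm : la.Perm lb := Multiset.coe_eq_coe.mp hmm
  rw [PySem.Set.equal_iff]
  intro x
  simp only [PySem.Set.mem_ofList]
  exact hperm.mem_iff

-- A's duplicate test (len(A) != len(set(A))) equals B's (len(set(A)) < len(A))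
lemma pv_dup (l : List Char) :
    (l.length != (PySem.Set.ofList l).length) = decide ((PySem.Set.ofList l).length < l.length) := by
  have hle := PySem.Set.length_ofList_le l
  rw [Bool.eq_iff_iff]
  simp only [bne_iff_ne, ne_eq, decide_eq_true_eq]
  omega

-- ---- B-side characterization: trimming preserves the mismatch list ----

lemma pvTrim_pvF (la : List Char) (lb : List Char) :
    pvF (((pvTrim la lb).1).zip ((pvTrim la lb).2)) = pvF (la.zip lb) := by
  induction la generalizing lb with
  | nil => cases lb <;> simp [pvTrim]
  | cons a la' ih =>
    cases lb with
    | nil => simp [pvTrim]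
    | cons b lb' =>
      by_cases h : a = b
      · simp [pvTrim, h, ih, pvF_cons]
      · simp [pvTrim, h]

lemma pvTrim_suffix (la lb : List Char) :
    (pvTrim la lb).1 <:+ la ∧ (pvTrim la lb).2 <:+ lb := by
  induction la generalizing lb with
  | nil => cases lb <;> simp [pvTrim]
  | cons a la' ih =>
    cases lb with
    | nil => simp [pvTrim]
    | cons b lb' =>
      by_cases h : a = b
      · subst h
        have hi := ih lb'
        simp only [pvTrim, beq_self_eq_true, if_true]
        exact ⟨hi.1.trans (List.suffix_cons a la'), hi.2.trans (List.suffix_cons a lb')⟩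
      · simp [pvTrim, h]

lemma pvTrim_ne (la lb : List Char) (hlen : la.length = lb.length) (hne : la ≠ lb) :
    ∃ x u ta tb, pvTrim la lb = (x :: ta, u :: tb) ∧ x ≠ u ∧ ta.length = tb.length := by
  induction la generalizing lb with
  | nil => cases lb with
    | nil => exact absurd rfl hne
    | cons b lb' => simp at hlen
  | cons a la' ih =>
    cases lb with
    | nil => simp at hlen
    | cons b lb' =>
      simp only [List.length_cons, Nat.add_right_cancel_iff] at hlen
      by_cases hab : a = b
      · subst hab
        have hne' : la' ≠ lb' := fun h => hne (by rw [h])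
        obtain ⟨x, u, ta, tb, h1, h2, h3⟩ := ih lb' hlen hne'
        exact ⟨x, u, ta, tb, by simpa [pvTrim] using h1, h2, h3⟩
      · exact ⟨a, b, la', lb', by simp [pvTrim, hab], hab, hlen⟩

lemma pv_suffix_getLast? (s l : List Char) (hs : s <:+ l) (hne : s ≠ []) :
    s.getLast? = l.getLast? := by
  obtain ⟨w, rfl⟩ := hs
  exact (List.getLast?_append_of_ne_nil w hne).symm

lemma pvF_nil_iff (la lb : List Char) (h : la.length = lb.length) :
    pvF (la.zip lb) = [] ↔ la = lb := by
  induction la generalizing lb with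
  | nil => cases lb with
    | nil => simp [pvF]
    | cons b lb' => simp at h
  | cons a la' ih =>
    cases lb with
    | nil => simp at h
    | cons b lb' =>
      simp only [List.length_cons, Nat.add_right_cancel_iff] at h
      by_cases hab : a = b
      · subst hab
        simp [List.zip_cons_cons, pvF_cons, ih lb' h]
      · simp [List.zip_cons_cons, pvF_cons, hab]

lemma pvF_append (l1 l2 : List (Char × Char)) : pvF (l1 ++ l2) = pvF l1 ++ pvF l2 := by
  simp [pvF]

lemma pvF_reverse (la lb : List Char) (h : la.length = lb.length) :
    pvF (la.reverse.zip lb.reverse) = (pvF (la.zip lb)).reverse := by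
  induction la generalizing lb with
  | nil => cases lb with
    | nil => simp [pvF]
    | cons b lb' => simp at h
  | cons a la' ih =>
    cases lb with
    | nil => simp at h
    | cons b lb' =>
      simp only [List.length_cons, Nat.add_right_cancel_iff] at h
      have hz : (la'.reverse ++ [a]).zip (lb'.reverse ++ [b])
          = la'.reverse.zip lb'.reverse ++ [(a, b)] :=
        List.zip_append (by simp [h])
      simp only [List.reverse_cons]
      rw [hz, pvF_append, ih lb' h]
      by_cases hab : a = b
      · simp [List.zip_cons_cons, hab, pvF]
      · simp [List.zip_cons_cons, hab, pvF]

-- the core check on a fully-decomposed core x::ma++[y] vs u::mb++[v] with mismatched ends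
lemma pv_core (x u y v : Char) (ma mb : List Char) (hlen : ma.length = mb.length)
    (hxu : x ≠ u) (hyv : y ≠ v) :
    (decide (2 ≤ (x :: (ma ++ [y])).length)
      && ((x :: (ma ++ [y])).head? == (u :: (mb ++ [v])).getLast?)
      && ((x :: (ma ++ [y])).getLast? == (u :: (mb ++ [v])).head?)
      && decide (((x :: (ma ++ [y])).drop 1).dropLast = ((u :: (mb ++ [v])).drop 1).dropLast))
    = (match pvF ((x :: (ma ++ [y])).zip (u :: (mb ++ [v]))) with
       | [(a1, b1), (a2, b2)] => a1 == b2 && b1 == a2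
       | _ => false) := by
  have hz : (ma ++ [y]).zip (mb ++ [v]) = ma.zip mb ++ [(y, v)] := List.zip_append hlen
  have hF : pvF ((x :: (ma ++ [y])).zip (u :: (mb ++ [v])))
      = (x, u) :: (pvF (ma.zip mb) ++ [(y, v)]) := by
    simp [List.zip_cons_cons, hxu, hz, pvF, hyv]
  rw [hF]
  have hgl1 : (x :: (ma ++ [y])).getLast? = some y := by
    rw [← List.head?_reverse]; simp
  have hgl2 : (u :: (mb ++ [v])).getLast? = some v := by
    rw [← List.head?_reverse]; simp
  have hmid1 : ((x :: (ma ++ [y])).drop 1).dropLast = ma := by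
    simp
  have hmid2 : ((u :: (mb ++ [v])).drop 1).dropLast = mb := by
    simp
  rw [hgl1, hgl2, hmid1, hmid2]
  have h2 : decide (2 ≤ (x :: (ma ++ [y])).length) = true := by
    simp
  rw [h2]
  cases hm : pvF (ma.zip mb) with
  | nil =>
    have : ma = mb := (pvF_nil_iff ma mb hlen).mp hm
    subst this
    show (true && (some x == some v) && (some y == some u) && decide (ma = ma))
        = (x == v && (u == y))
    simp [Bool.beq_comm]
  | cons p l =>
    have hne : ma ≠ mb := fun h => by
      rw [(pvF_nil_iff ma mb hlen).mpr h] at hm; exact (List.cons_ne_nil p l) hm.symm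
    have : decide (ma = mb) = false := by simp [hne]
    rw [this]
    obtain ⟨p1, p2⟩ := p
    cases l with
    | nil => simp
    | cons q t => simp

-- the trimmed core of two different equal-length lists, checked B's way, equals A's
-- two-cross-mismatch test on the full mismatch list
lemma pv_main (la lb : List Char) (hlen : la.length = lb.length) (hne : la ≠ lb) :
    (let p1 := pvTrim la lb
     let p2 := pvTrim p1.1.reverse p1.2.reverse
     let ca := p2.1.reverse
     let cb := p2.2.reverse
     decide (2 ≤ ca.length) && (ca.head? == cb.getLast?) && (ca.getLast? == cb.head?)
       && decide ((ca.drop 1).dropLast = (cb.drop 1).dropLast))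
    = (match pvF (la.zip lb) with
       | [(a1, b1), (a2, b2)] => a1 == b2 && b1 == a2
       | _ => false) := by
  obtain ⟨x, u, ta, tb, h1, hxu, hlen1⟩ := pvTrim_ne la lb hlen hne
  have hF1 : pvF ((x :: ta).zip (u :: tb)) = pvF (la.zip lb) := by
    have := pvTrim_pvF la lb; rw [h1] at this; exact this
  have hlen1' : (x :: ta).reverse.length = (u :: tb).reverse.length := by simp [hlen1]
  have hne1 : (x :: ta).reverse ≠ (u :: tb).reverse := by
    intro h
    have := List.reverse_injective h
    exact hxu (by injection this)
  obtain ⟨y, v, sa, sb, h2, hyv, hlen2⟩ := pvTrim_ne _ _ hlen1' hne1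
  have hF2 : pvF ((y :: sa).zip (v :: sb)) = (pvF ((x :: ta).zip (u :: tb))).reverse := by
    have hpp := pvTrim_pvF (x :: ta).reverse (u :: tb).reverse
    rw [h2] at hpp
    rw [hpp, pvF_reverse _ _ (by simp [hlen1])]
  -- last elements of the twice-trimmed (reversed) core are the original first mismatch
  have hsuf := pvTrim_suffix (x :: ta).reverse (u :: tb).reverse
  rw [h2] at hsuf
  have hgl1 : (y :: sa).getLast? = some x := by
    rw [pv_suffix_getLast? _ _ hsuf.1 (List.cons_ne_nil y sa)]
    rw [← List.head?_reverse]; simp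
  have hgl2 : (v :: sb).getLast? = some u := by
    rw [pv_suffix_getLast? _ _ hsuf.2 (List.cons_ne_nil v sb)]
    rw [← List.head?_reverse]; simp
  -- rewrite the let-bound core
  rw [h1]
  show (let p2 := pvTrim (x :: ta).reverse (u :: tb).reverse
        let ca := p2.1.reverse
        let cb := p2.2.reverse
        decide (2 ≤ ca.length) && (ca.head? == cb.getLast?) && (ca.getLast? == cb.head?)
          && decide ((ca.drop 1).dropLast = (cb.drop 1).dropLast)) = _
  rw [h2]
  show (decide (2 ≤ (y :: sa).reverse.length)
      && ((y :: sa).reverse.head? == (v :: sb).reverse.getLast?)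
      && ((y :: sa).reverse.getLast? == (v :: sb).reverse.head?)
      && decide (((y :: sa).reverse.drop 1).dropLast = ((v :: sb).reverse.drop 1).dropLast)) = _
  -- the mismatch list of the core equals that of the whole input
  have hFc : pvF ((y :: sa).reverse.zip (v :: sb).reverse) = pvF (la.zip lb) := by
    rw [pvF_reverse _ _ (by simpa using hlen2), hF2, List.reverse_reverse, hF1]
  rw [← hFc]
  -- decompose the reversed core as x' :: (ma ++ [y]) with x' = x, and likewise for the other side
  cases hsa : sa with
  | nil =>
    -- core has length 1 on both sides (lengths are equal)
    cases hsb : sb with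
    | cons w sb' => rw [hsa, hsb] at hlen2; simp at hlen2
    | nil =>
      subst hsa; subst hsb
      show (decide (2 ≤ ([y] : List Char).length) && _ && _ && _) = _
      have : decide (2 ≤ ([y] : List Char).length) = false := by simp
      rw [this]
      simp only [Bool.false_and]
      have : pvF (([y] : List Char).reverse.zip ([v] : List Char).reverse) = [(y, v)] := by
        simp [pvF, hyv]
      rw [this]
  | cons z sa' =>
    cases hsb : sb with
    | nil => rw [hsa, hsb] at hlen2; simp at hlen2
    | cons w sb' =>
      subst hsa; subst hsb
      -- (y :: z :: sa').reverse = (z :: sa').reverse ++ [y], and (z :: sa').reverse is a cons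
      obtain ⟨x', ma, hma⟩ : ∃ x' ma, (z :: sa').reverse = x' :: ma := by
        cases hrev : (z :: sa').reverse with
        | nil => exact absurd (congrArg List.length hrev) (by simp)
        | cons x' ma => exact ⟨x', ma, rfl⟩
      obtain ⟨u', mb, hmb⟩ : ∃ u' mb, (w :: sb').reverse = u' :: mb := by
        cases hrev : (w :: sb').reverse with
        | nil => exact absurd (congrArg List.length hrev) (by simp)
        | cons u' mb => exact ⟨u', mb, rfl⟩
      have hx' : x' = x := by
        have : (y :: z :: sa').getLast? = some x' := by
          rw [← List.head?_reverse]; simp [List.reverse_cons, hma]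
        rw [hgl1] at this; injection this with h; exact h.symm
      have hu' : u' = u := by
        have : (v :: w :: sb').getLast? = some u' := by
          rw [← List.head?_reverse]; simp [List.reverse_cons, hmb]
        rw [hgl2] at this; injection this with h; exact h.symm
      have hrw1 : (y :: z :: sa').reverse = x' :: (ma ++ [y]) := by
        rw [List.reverse_cons, hma]; rfl
      have hrw2 : (v :: w :: sb').reverse = u' :: (mb ++ [v]) := by
        rw [List.reverse_cons, hmb]; rfl
      have hlenm : ma.length = mb.length := by
        have h1 := congrArg List.length hma
        have h2 := congrArg List.length hmb
        simp at h1 h2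
        simp only [List.length_cons, Nat.add_right_cancel_iff] at hlen2
        omega
      rw [hrw1, hrw2]
      exact pv_core x' u' y v ma mb hlenm (hx' ▸ hu' ▸ hxu) hyv

-- ===== VERDICT (by name: the statement is the Claim_ definition above) =====
theorem solution_546_5_spec : Claim_equal_solution_546_5 := by
  intro A B _
  show solution_546_5 A B = solution_546_5_alt A B
  unfold solution_546_5 solution_546_5_alt
  by_cases hlen : A.toList.length = B.toList.length
  · have hbne : (A.toList.length != B.toList.length) = false := by
      simp only [bne_eq_false_iff_eq]; exact hlen
    rw [hbne]
    by_cases hAB : A = B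
    · subst hAB
      have hset : PySem.Set.equal (PySem.Set.ofList A.toList) (PySem.Set.ofList A.toList) = true := by
        rw [PySem.Set.equal_iff]; intro x; rfl
      rw [hset]
      have hAA : (A == A) = true := beq_self_eq_true A
      simp only [hAA, Bool.not_true, Bool.or_false, Bool.false_eq_true, if_false, if_true]
      exact pv_dup A.toList
    · have hABb : (A == B) = false := beq_eq_false_iff_ne.mpr hAB
      have hlne : A.toList ≠ B.toList := fun h => hAB (String.toList_inj.mp h)
      have hmain := pv_main A.toList B.toList hlen hlne
      by_cases hset : PySem.Set.equal (PySem.Set.ofList A.toList) (PySem.Set.ofList B.toList) = true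
      · rw [hset]
        simp only [hABb, Bool.not_true, Bool.or_false, Bool.false_eq_true, if_false]
        rw [pvLoopA_start, hmain]
        cases hF : pvF (A.toList.zip B.toList) with
        | nil => rfl
        | cons q t =>
          obtain ⟨a1, b1⟩ := q
          cases t with
          | nil => rfl
          | cons r u =>
            obtain ⟨a2, b2⟩ := r
            cases u with
            | nil =>
              show (a2 == b1 && b2 == a1) = (a1 == b2 && b1 == a2)
              rw [Bool.eq_iff_iff, Bool.and_eq_true, Bool.and_eq_true,
                beq_iff_eq, beq_iff_eq, beq_iff_eq, beq_iff_eq]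
              constructor
              · rintro ⟨x, y⟩; exact ⟨y.symm, x.symm⟩
              · rintro ⟨x, y⟩; exact ⟨y.symm, x.symm⟩
            | cons s v => rfl
      · have hset' : PySem.Set.equal (PySem.Set.ofList A.toList) (PySem.Set.ofList B.toList) = false :=
          Bool.eq_false_iff.mpr hset
        rw [hset']
        simp only [hABb, Bool.not_false, Bool.or_true, Bool.false_eq_true, if_true, if_false]
        rw [hmain]
        cases hF : pvF (A.toList.zip B.toList) with
        | nil => rfl
        | cons q t =>
          obtain ⟨a1, b1⟩ := q
          cases t with
          | nil => rfl
          | cons r u =>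
            obtain ⟨a2, b2⟩ := r
            cases u with
            | nil =>
              show false = (a1 == b2 && b1 == a2)
              by_cases hc : (a1 == b2 && b1 == a2) = true
              · exfalso
                simp only [Bool.and_eq_true, beq_iff_eq] at hc
                have := pv_sets_equal A.toList B.toList hlen a1 b1 a2 b2 hF hc.1 hc.2
                exact hset this
              · simp only [Bool.not_eq_true] at hc; rw [hc]
            | cons s v => rfl
  · have hbne : (A.toList.length != B.toList.length) = true := bne_iff_ne.mpr hlen
    rw [hbne]
    rfl
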